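-- pv_equiv track=rewrite | github.com/smzuluaga/myPythonCode | exercises/exercise22.py | r2rightTriangle
-- ===== SOURCE A (Python) =====
-- def r2rightTriangle(strArr):
--   newArr = sorted(set(strArr))
--   newArr = list(map(lambda x: x.split(","),newArr))
--   counter = 0
--
--   for i in range (len(newArr)):
--     for j in range (len(newArr)):
--       if newArr[i] == newArr[j]:
--         continue
--       if newArr[i][0] == newArr[j][0]:
--         for k in range (len(newArr)):
--             if newArr[i] == newArr[k] or newArr[k] == newArr[j]:
--               continue
--             elif newArr[i][1] == newArr[k][1]:
--               counter +=1
--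
--   return counter
-- ===== SOURCE B (Python) =====
-- def r2rightTriangle(strArr):
--     pts = [s.split(",") for s in set(strArr)]
--     cntx, cnty, cntxy = {}, {}, {}
--     for p in pts:
--         cntx[p[0]] = cntx.get(p[0], 0) + 1
--         if len(p) > 1:
--             cnty[p[1]] = cnty.get(p[1], 0) + 1
--             cntxy[(p[0], p[1])] = cntxy.get((p[0], p[1]), 0) + 1
--     total = 0
--     for p in pts:
--         if len(p) > 1 and cntx[p[0]] > 1:
--             total += (cntx[p[0]] - 1) * (cnty[p[1]] - 1) - (cntxy[(p[0], p[1])] - 1)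
--     return total
-- ===== Notes on version B (the rewrite author's own statement) =====
-- stated objective: faster
-- what changed: replaces A's O(n^3) triple index loop by one counting pass building hash maps of x-, y- and (x,y)-coordinate multiplicities, then sums (cntx-1)*(cnty-1)-(cntxy-1) per point
import Mathlib
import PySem

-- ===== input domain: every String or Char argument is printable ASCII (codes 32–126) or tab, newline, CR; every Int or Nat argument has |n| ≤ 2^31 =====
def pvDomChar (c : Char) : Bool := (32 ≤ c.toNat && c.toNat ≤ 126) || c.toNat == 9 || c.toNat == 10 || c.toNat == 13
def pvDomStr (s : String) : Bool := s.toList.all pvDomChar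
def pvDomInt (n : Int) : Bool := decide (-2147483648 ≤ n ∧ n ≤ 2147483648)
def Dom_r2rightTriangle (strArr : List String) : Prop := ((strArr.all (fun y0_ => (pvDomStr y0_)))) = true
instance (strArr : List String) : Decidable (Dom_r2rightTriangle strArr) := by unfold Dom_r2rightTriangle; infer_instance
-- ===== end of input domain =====

-- B replaces A's cubic triple loop by one counting pass over coordinate multiplicity
-- dictionaries (objective: faster; measured).

-- shared vocabulary of both ports: s.split(","), p[0], p[1]
def pySplit (s : String) : List String := (PySem.Str.split? s ",").getD []
def xf (p : List String) : String := PySem.List.pyGetD p 0 ""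
def yf (p : List String) : String := PySem.List.pyGetD p 1 ""

-- ===== PORT A =====
def r2rightTriangle (strArr : List String) : Int :=
  let newArr0 := PySem.List.sorted (PySem.Set.ofList strArr) (fun x => x) false
  let newArr := newArr0.map pySplit
  let n : Int := (newArr.length : Int)
  (PySem.List.pyRange 0 n 1).foldl (fun counter i =>
    (PySem.List.pyRange 0 n 1).foldl (fun counter j =>
      if PySem.List.pyGetD newArr i [] = PySem.List.pyGetD newArr j [] then counter
      else if xf (PySem.List.pyGetD newArr i []) = xf (PySem.List.pyGetD newArr j []) then
        (PySem.List.pyRange 0 n 1).foldl (fun counter k =>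
          if PySem.List.pyGetD newArr i [] = PySem.List.pyGetD newArr k []
              ∨ PySem.List.pyGetD newArr k [] = PySem.List.pyGetD newArr j [] then counter
          else if yf (PySem.List.pyGetD newArr i []) = yf (PySem.List.pyGetD newArr k []) then
            counter + 1
          else counter) counter
      else counter) counter) 0

-- ===== PORT B =====
def r2rightTriangle_alt (strArr : List String) : Int :=
  let pts := (PySem.Set.ofList strArr).map pySplit
  let cnts := pts.foldl (fun s p =>
      (s.1.insert (xf p) (s.1.getD (xf p) 0 + 1),
       if 1 < p.length then
         (s.2.1.insert (yf p) (s.2.1.getD (yf p) 0 + 1),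
          s.2.2.insert (xf p, yf p) (s.2.2.getD (xf p, yf p) 0 + 1))
       else s.2))
    ((PySem.Dict.empty : PySem.Dict String Int),
     ((PySem.Dict.empty : PySem.Dict String Int),
      (PySem.Dict.empty : PySem.Dict (String × String) Int)))
  let cntx := cnts.1
  let cnty := cnts.2.1
  let cntxy := cnts.2.2
  pts.foldl (fun total p =>
    if 1 < p.length ∧ 1 < cntx.getD (xf p) 0 then
      total + ((cntx.getD (xf p) 0 - 1) * (cnty.getD (yf p) 0 - 1)
               - (cntxy.getD (xf p, yf p) 0 - 1))
    else total) 0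

-- ===== PRECONDITION & SPEC =====
-- Pre_ excludes exactly the inputs on which A raises IndexError: at least 3 distinct strings,
-- two distinct ones sharing their first comma-field, and some string containing no comma.
def Pre_r2rightTriangle (strArr : List String) : Prop :=
  ((PySem.Set.ofList strArr).map pySplit).length ≤ 2 ∨
  (∀ p ∈ (PySem.Set.ofList strArr).map pySplit, 2 ≤ p.length) ∨
  (∀ p ∈ (PySem.Set.ofList strArr).map pySplit, ∀ q ∈ (PySem.Set.ofList strArr).map pySplit,
      p ≠ q → xf p ≠ xf q)
instance (strArr : List String) : Decidable (Pre_r2rightTriangle strArr) := by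
  unfold Pre_r2rightTriangle; infer_instance

def pvWitness_r2rightTriangle : List String := ["0,0", "0,1", "1,0"]

def Spec_r2rightTriangle (strArr : List String) (out : Int) : Prop := out = r2rightTriangle_alt strArr
instance (strArr : List String) (out : Int) : Decidable (Spec_r2rightTriangle strArr out) := by
  unfold Spec_r2rightTriangle; infer_instance

-- ===== CLAIM (what is proved, stated in full; the proofs are below) =====
def Claim_equal_r2rightTriangle : Prop := ∀ (strArr : List String), Dom_r2rightTriangle strArr → Pre_r2rightTriangle strArr → Spec_r2rightTriangle strArr (r2rightTriangle strArr)

-- ===== LEMMAS AND PROOFS =====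

theorem pv_join_snoc (sep y : List Char) (xs : List (List Char)) :
    PySem.Chars.join sep (xs ++ [y]) =
      PySem.Chars.join sep xs ++ (if xs = [] then [] else sep) ++ y := by
  induction xs with
  | nil => simp [PySem.Chars.join_singleton, PySem.Chars.join_nil]
  | cons a t ih =>
    cases t with
    | nil => simp [PySem.Chars.join_cons_cons, PySem.Chars.join_singleton]
    | cons b u =>
      simp only [List.cons_append, PySem.Chars.join_cons_cons] at *
      simp [ih]

theorem pv_go_join (sep : List Char) (hsep : sep ≠ []) :
    ∀ (fuel : Nat) (l cur : List Char) (acc : List (List Char)), l.length < fuel →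
      PySem.Chars.join sep (PySem.Chars.splitOn.go sep fuel l cur acc) =
        PySem.Chars.join sep acc.reverse ++ (if acc = [] then [] else sep) ++ cur.reverse ++ l := by
  intro fuel
  induction fuel with
  | zero => intro l cur acc h; omega
  | succ f ih =>
    intro l cur acc h
    cases l with
    | nil =>
      simp only [PySem.Chars.splitOn.go, List.reverse_cons, pv_join_snoc]
      simp
    | cons c rest =>
      by_cases hpre : sep.isPrefixOf (c :: rest) = true
      · rw [show PySem.Chars.splitOn.go sep (f+1) (c :: rest) cur acc =
            PySem.Chars.splitOn.go sep f (List.drop sep.length (c :: rest)) [] (cur.reverse :: acc) by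
          simp [PySem.Chars.splitOn.go, hpre]]
        rw [ih _ _ _ (by
          have : 1 ≤ sep.length := by cases sep; simp at hsep; simp
          simp only [List.length_drop, List.length_cons] at *
          omega)]
        have hl : sep ++ List.drop sep.length (c :: rest) = c :: rest :=
          List.prefix_iff_eq_append.mp (List.isPrefixOf_iff_prefix.mp hpre)
        simp only [List.reverse_cons, pv_join_snoc]
        rcases acc with _ | ⟨a0, acc'⟩ <;> simp <;> exact hl
      · rw [show PySem.Chars.splitOn.go sep (f+1) (c :: rest) cur acc =
            PySem.Chars.splitOn.go sep f rest (c :: cur) acc by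
          simp [PySem.Chars.splitOn.go, hpre]]
        rw [ih _ _ _ (by simp at h ⊢; omega)]
        simp

theorem pv_join_splitOn (sep : List Char) (hsep : sep ≠ []) (cs : List Char) :
    PySem.Chars.join sep (PySem.Chars.splitOn cs sep) = cs := by
  unfold PySem.Chars.splitOn
  rw [pv_go_join sep hsep _ _ _ _ (by omega)]
  simp [PySem.Chars.join_nil]

theorem pv_pySplit_eq (s : String) :
    pySplit s = (PySem.Chars.splitOn s.toList [',']).map String.ofList := by
  have h : ("," : String).toList = [','] := by decide
  simp [pySplit, PySem.Str.split?, PySem.Chars.split?, h]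

theorem pv_pySplit_inj : Function.Injective pySplit := by
  intro s t h
  rw [pv_pySplit_eq, pv_pySplit_eq] at h
  have h2 : PySem.Chars.splitOn s.toList [','] = PySem.Chars.splitOn t.toList [','] := by
    have := congrArg (List.map String.toList) h
    simpa [List.map_map, Function.comp_def, String.toList_ofList] using this
  have h3 := congrArg (PySem.Chars.join [',']) h2
  rw [pv_join_splitOn [','] (by simp), pv_join_splitOn [','] (by simp)] at h3
  exact String.toList_inj.mp h3

theorem pv_nodup_pts (strArr : List String) :
    ((PySem.Set.ofList strArr).map pySplit).Nodup :=
  (PySem.Set.nodup_ofList strArr).map pv_pySplit_inj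

def pvCX (l : List (List String)) (p : List String) : Nat := l.countP (fun q => decide (xf q = xf p))
def pvCY (l : List (List String)) (p : List String) : Nat :=
  l.countP (fun q => decide (1 < q.length) && decide (yf q = yf p))
def pvCXY (l : List (List String)) (p : List String) : Nat :=
  l.countP (fun q => decide (xf q = xf p) && decide (yf q = yf p) && decide (1 < q.length))
def pvATerm (l : List (List String)) (p : List String) : Int :=
  (l.map (fun q => if p = q then 0 else if xf p = xf q then
    (l.countP (fun r => !(decide (p = r) || decide (r = q)) && decide (yf p = yf r)) : Int) else 0)).sum
def pvBTerm (l : List (List String)) (p : List String) : Int :=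
  if 1 < p.length ∧ 1 < (pvCX l p : Int) then
    ((pvCX l p : Int) - 1) * ((pvCY l p : Int) - 1) - ((pvCXY l p : Int) - 1)
  else 0

theorem pv_countP_erase_one {α : Type} [DecidableEq α] (P : α → Bool) (p : α) :
    ∀ l : List α, l.Nodup → p ∈ l →
      l.countP (fun r => decide (r ≠ p) && P r) + (if P p then 1 else 0) = l.countP P := by
  intro l
  induction l with
  | nil => intro _ h; simp at h
  | cons a t ih =>
    intro hnd hp
    rcases List.mem_cons.mp hp with rfl | hpt
    · have hnotin : p ∉ t := (List.nodup_cons.mp hnd).1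
      have ht : t.countP (fun r => decide (r ≠ p) && P r) = t.countP P := by
        apply List.countP_congr
        intro r hr
        have : r ≠ p := fun e => hnotin (e ▸ hr)
        simp [this]
      simp only [List.countP_cons, ht]
      simp
    · have ha : a ≠ p := fun e => (List.nodup_cons.mp hnd).1 (e ▸ hpt)
      have := ih (List.nodup_cons.mp hnd).2 hpt
      simp only [ne_eq, decide_not] at this ⊢
      simp only [List.countP_cons]
      by_cases hPa : P a <;> simp [hPa, ha] <;> omega

theorem pv_countP_erase_two {α : Type} [DecidableEq α] (P : α → Bool) (p q : α)
    (l : List α) (hnd : l.Nodup) (hp : p ∈ l) (hq : q ∈ l) (hpq : p ≠ q) :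
      l.countP (fun r => decide (r ≠ p) && decide (r ≠ q) && P r)
        + (if P p then 1 else 0) + (if P q then 1 else 0) = l.countP P := by
  have h1 := pv_countP_erase_one (fun r => decide (r ≠ q) && P r) p l hnd hp
  have h2 := pv_countP_erase_one P q l hnd hq
  simp only [ne_eq, decide_not, Bool.and_assoc] at h1 h2 ⊢
  rw [show (!decide (p = q) && P p) = P p by simp [hpq]] at h1
  omega

theorem pv_ite_add (c : Prop) [Decidable c] (a e : Int) :
    (if c then a + e else a) = a + (if c then e else 0) := by
  split <;> simp

theorem pv_sum_ite_sub {α : Type} (C D : α → Bool) (c : Int) (l : List α) :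
    (l.map (fun q => if C q then c - (if D q then (1 : Int) else 0) else 0)).sum =
      c * (l.countP C : Int) - (l.countP (fun q => C q && D q) : Int) := by
  induction l with
  | nil => simp
  | cons a t ih =>
    simp only [List.map_cons, List.sum_cons, List.countP_cons, ih]
    by_cases hC : C a <;> by_cases hD : D a <;> simp [hC, hD] <;> push_cast <;> ring

-- case: no two distinct points share an x-coordinate
theorem pv_term_noshare (l : List (List String)) (hnd : l.Nodup)
    (hns : ∀ p ∈ l, ∀ q ∈ l, p ≠ q → xf p ≠ xf q) (p : List String) (hp : p ∈ l) :
    pvATerm l p = pvBTerm l p := by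
  have hA : pvATerm l p = 0 := by
    unfold pvATerm
    rw [List.map_congr_left (g := fun _ => (0 : Int))
        (by intro q hq
            by_cases h1 : p = q
            · simp [h1]
            · simp [h1, hns p hp q hq h1])]
    simp
  have hcx : pvCX l p = 1 := by
    have h0 := pv_countP_erase_one (fun q => decide (xf q = xf p)) p l hnd hp
    have hz : l.countP (fun r => decide (r ≠ p) && decide (xf r = xf p)) = 0 := by
      rw [List.countP_eq_zero]
      intro a ha
      by_cases h1 : a = p
      · simp [h1]
      · simp [h1, hns a ha p hp h1]
    rw [hz] at h0
    simpa [pvCX] using h0.symm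
  rw [hA]
  unfold pvBTerm
  rw [hcx]
  norm_num
theorem pv_mem_two {α : Type} (l : List α) (h2 : l.length ≤ 2) (p q r : α)
    (hp : p ∈ l) (hq : q ∈ l) (hr : r ∈ l) (hpq : p ≠ q) : r = p ∨ r = q := by
  match l, h2 with
  | [], _ => simp at hp
  | [a], _ => simp_all
  | [a, b], _ =>
    simp only [List.mem_cons, List.mem_singleton, List.not_mem_nil, or_false] at hp hq hr
    rcases hp with rfl | rfl <;> rcases hq with rfl | rfl <;> rcases hr with rfl | rfl <;> tauto

theorem pv_pred_eq (p q r : List String) (P : Bool) :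
    (!(decide (p = r) || decide (r = q)) && P) = (decide (r ≠ p) && decide (r ≠ q) && P) := by
  by_cases h1 : p = r
  · simp [h1]
  · by_cases h2 : r = q
    · simp [h1, h2]
    · have h1' : ¬ r = p := fun e => h1 e.symm
      simp [h1, h2, h1']

-- case: at most two distinct points
theorem pv_term_short (l : List (List String)) (hnd : l.Nodup) (h2 : l.length ≤ 2)
    (p : List String) (hp : p ∈ l) : pvATerm l p = pvBTerm l p := by
  have hA : pvATerm l p = 0 := by
    unfold pvATerm
    rw [List.map_congr_left (g := fun _ => (0 : Int))
        (by intro q hq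
            by_cases h1 : p = q
            · simp [h1]
            · simp only [if_neg h1]
              split
              · norm_cast
                rw [List.countP_eq_zero]
                intro a ha
                rcases pv_mem_two l h2 p q a hp hq ha h1 with rfl | rfl <;> simp
              · rfl)]
    simp
  rw [hA]
  unfold pvBTerm
  by_cases hg : 1 < p.length ∧ 1 < (pvCX l p : Int)
  · have hcx2 : 1 < pvCX l p := by exact_mod_cast hg.2
    have hq : ∃ q ∈ l, q ≠ p ∧ xf q = xf p := by
      have : 0 < l.countP (fun r => decide (r ≠ p) && decide (xf r = xf p)) := by
        have h0 := pv_countP_erase_one (fun q => decide (xf q = xf p)) p l hnd hp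
        have hcx2' : 1 < l.countP (fun q => decide (xf q = xf p)) := hcx2
        rw [if_pos (by simp)] at h0
        beta_reduce at h0
        omega
      rcases List.countP_pos_iff.mp this with ⟨a, ha, hpa⟩
      simp only [Bool.and_eq_true, decide_eq_true_eq] at hpa
      exact ⟨a, ha, hpa.1, hpa.2⟩
    rcases hq with ⟨q, hql, hqp, hxq⟩
    have hcx2' : pvCX l p = 2 := by
      have hle : pvCX l p ≤ l.length := List.countP_le_length
      omega
    have hcycxy : pvCY l p = pvCXY l p := by
      unfold pvCY pvCXY
      apply List.countP_congr
      intro r hr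
      rcases pv_mem_two l h2 p q r hp hql hr (fun e => hqp e.symm) with rfl | rfl <;>
        simp [hxq] <;> tauto
    rw [if_pos hg, hcx2', hcycxy]
    ring
  · rw [if_neg hg]

-- case: every point has both coordinates
theorem pv_term_long (l : List (List String)) (hnd : l.Nodup)
    (hall : ∀ p ∈ l, 2 ≤ p.length) (p : List String) (hp : p ∈ l) :
    pvATerm l p = pvBTerm l p := by
  have hplen : 1 < p.length := hall p hp
  have hcy' : l.countP (fun r => decide (yf p = yf r)) = pvCY l p := by
    unfold pvCY
    apply List.countP_congr
    intro r hr
    have h2r : 1 < r.length := hall r hr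
    simp only [decide_eq_true_eq, Bool.and_eq_true]
    constructor
    · intro h; exact ⟨by simpa using h2r, h.symm⟩
    · intro h; exact h.2.symm
  have hmap : pvATerm l p = (l.map (fun q =>
      if (decide (p ≠ q) && decide (xf p = xf q)) then
        ((pvCY l p : Int) - 1) - (if decide (yf p = yf q) then (1 : Int) else 0)
      else 0)).sum := by
    unfold pvATerm
    apply congrArg
    apply List.map_congr_left
    intro q hq
    by_cases h1 : p = q
    · simp [h1]
    · by_cases h2 : xf p = xf q
      · have e2 := pv_countP_erase_two (fun r => decide (yf p = yf r)) p q l hnd hp hq h1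
        have epred : l.countP (fun r => !(decide (p = r) || decide (r = q)) && decide (yf p = yf r))
            = l.countP (fun r => decide (r ≠ p) && decide (r ≠ q) && decide (yf p = yf r)) := by
          apply List.countP_congr
          intro r hr
          rw [pv_pred_eq]
        rw [if_neg h1, if_pos h2, if_pos (by simp [h1, h2]), epred]
        rw [if_pos (by simp)] at e2
        beta_reduce at e2
        rw [hcy'] at e2
        by_cases h3 : yf p = yf q
        · rw [if_pos (by simpa using h3)] at e2 ⊢
          omega
        · rw [if_neg (by simpa using h3)] at e2 ⊢
          omega
      · simp [h1, h2]
  rw [hmap, pv_sum_ite_sub]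
  have eC : l.countP (fun q => decide (p ≠ q) && decide (xf p = xf q)) + 1 = pvCX l p := by
    have h0 := pv_countP_erase_one (fun q => decide (xf q = xf p)) p l hnd hp
    rw [if_pos (by simp)] at h0
    beta_reduce at h0
    have epred : l.countP (fun q => decide (p ≠ q) && decide (xf p = xf q))
        = l.countP (fun r => decide (r ≠ p) && decide (xf r = xf p)) := by
      apply List.countP_congr
      intro x hx
      simp only [Bool.and_eq_true, decide_eq_true_eq, ne_eq]
      constructor <;> rintro ⟨a, b⟩ <;> exact ⟨fun e => a e.symm, b.symm⟩
    rw [epred]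
    exact h0
  have eCD : l.countP (fun q => (decide (p ≠ q) && decide (xf p = xf q)) && decide (yf p = yf q)) + 1
      = pvCXY l p := by
    have h0 := pv_countP_erase_one
      (fun q => decide (xf q = xf p) && decide (yf q = yf p) && decide (1 < q.length)) p l hnd hp
    rw [if_pos (by simp [hplen])] at h0
    beta_reduce at h0
    have epred : l.countP (fun q => (decide (p ≠ q) && decide (xf p = xf q)) && decide (yf p = yf q))
        = l.countP (fun r => decide (r ≠ p) &&
            (decide (xf r = xf p) && decide (yf r = yf p) && decide (1 < r.length))) := by
      apply List.countP_congr
      intro x hx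
      have h2x : 1 < x.length := hall x hx
      simp only [Bool.and_eq_true, decide_eq_true_eq, ne_eq]
      constructor
      · rintro ⟨⟨a, b⟩, c⟩; exact ⟨fun e => a e.symm, ⟨b.symm, c.symm⟩, h2x⟩
      · rintro ⟨a, ⟨b, c⟩, _⟩; exact ⟨⟨fun e => a e.symm, b.symm⟩, c.symm⟩
    rw [epred]
    exact h0
  by_cases hg : 1 < (pvCX l p : Int)
  · have e1 : (l.countP (fun q => decide (p ≠ q) && decide (xf p = xf q)) : Int)
        = (pvCX l p : Int) - 1 := by omega
    have e2 : (l.countP (fun q => (decide (p ≠ q) && decide (xf p = xf q)) && decide (yf p = yf q)) : Int)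
        = (pvCXY l p : Int) - 1 := by omega
    unfold pvBTerm
    rw [if_pos ⟨hplen, hg⟩, e1, e2]
    ring
  · have hpos : 0 < pvCX l p := List.countP_pos_iff.mpr ⟨p, hp, by simp⟩
    have hcx1 : pvCX l p = 1 := by omega
    have ec0 : l.countP (fun q => decide (p ≠ q) && decide (xf p = xf q)) = 0 := by omega
    have ecd0 : l.countP (fun q => (decide (p ≠ q) && decide (xf p = xf q)) && decide (yf p = yf q)) = 0 := by
      have hm : l.countP (fun q => (decide (p ≠ q) && decide (xf p = xf q)) && decide (yf p = yf q))
          ≤ l.countP (fun q => decide (p ≠ q) && decide (xf p = xf q)) :=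
        List.countP_mono_left (by intro x hx h; exact (Bool.and_eq_true _ _ |>.mp h).1)
      omega
    unfold pvBTerm
    rw [if_neg (by intro h; exact hg h.2), ec0, ecd0]
    simp

theorem pv_A_inner (L : List (List String)) (pi pj : List String) (c : Int) :
    (PySem.List.pyRange 0 (L.length : Int) 1).foldl (fun counter k =>
        if pi = PySem.List.pyGetD L k [] ∨ PySem.List.pyGetD L k [] = pj then counter
        else if yf pi = yf (PySem.List.pyGetD L k []) then counter + 1
        else counter) c
      = c + (L.countP (fun r => !(decide (pi = r) || decide (r = pj)) && decide (yf pi = yf r)) : Int) := by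
  rw [PySem.List.foldl_pyRange_zero_pyGetD' L []
      (fun counter pk => if pi = pk ∨ pk = pj then counter
        else if yf pi = yf pk then counter + 1 else counter) c]
  rw [PySem.List.foldl_congr_mem L _
      (fun counter pk => if ¬(pi = pk ∨ pk = pj) ∧ yf pi = yf pk then counter + 1 else counter) c
      (by intro acc x hx
          by_cases h1 : pi = x ∨ x = pj <;> by_cases h2 : yf pi = yf x <;> simp [h1, h2])]
  rw [PySem.List.foldl_ite_add_one]
  congr 1
  norm_cast
  apply List.countP_congr
  intro x hx
  simp only [decide_eq_true_eq, Bool.and_eq_true, Bool.or_eq_true, Bool.not_eq_true', decide_eq_false_iff_not, Bool.not_or, Bool.and_eq_true, decide_eq_true_eq]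
  tauto

theorem pv_A_mid (L : List (List String)) (pi : List String) (c : Int) :
    (PySem.List.pyRange 0 (L.length : Int) 1).foldl (fun counter j =>
        if pi = PySem.List.pyGetD L j [] then counter
        else if xf pi = xf (PySem.List.pyGetD L j []) then
          (PySem.List.pyRange 0 (L.length : Int) 1).foldl (fun counter k =>
            if pi = PySem.List.pyGetD L k []
                ∨ PySem.List.pyGetD L k [] = PySem.List.pyGetD L j [] then counter
            else if yf pi = yf (PySem.List.pyGetD L k []) then counter + 1
            else counter) counter
        else counter) c
      = c + (L.map (fun pj =>
          if pi = pj then 0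
          else if xf pi = xf pj then
            (L.countP (fun r => !(decide (pi = r) || decide (r = pj)) && decide (yf pi = yf r)) : Int)
          else 0)).sum := by
  rw [PySem.List.foldl_pyRange_zero_pyGetD' L []
      (fun counter pj => if pi = pj then counter
        else if xf pi = xf pj then
          (PySem.List.pyRange 0 (L.length : Int) 1).foldl (fun counter k =>
            if pi = PySem.List.pyGetD L k [] ∨ PySem.List.pyGetD L k [] = pj then counter
            else if yf pi = yf (PySem.List.pyGetD L k []) then counter + 1
            else counter) counter
        else counter) c]
  rw [PySem.List.foldl_congr_mem L _
      (fun counter pj => counter +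
        (if pi = pj then 0
         else if xf pi = xf pj then
           (L.countP (fun r => !(decide (pi = r) || decide (r = pj)) && decide (yf pi = yf r)) : Int)
         else 0)) c
      (by intro acc x hx
          by_cases h1 : pi = x
          · simp [h1]
          · by_cases h2 : xf pi = xf x <;> simp [h1, h2, pv_A_inner])]
  rw [PySem.List.foldl_add]

theorem pv_A_eq_sum (strArr : List String) :
    r2rightTriangle strArr =
      (((PySem.Set.ofList strArr).map pySplit).map (fun p =>
        (((PySem.Set.ofList strArr).map pySplit).map (fun q =>
          if p = q then 0
          else if xf p = xf q then
            (((PySem.Set.ofList strArr).map pySplit).countP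
              (fun r => !(decide (p = r) || decide (r = q)) && decide (yf p = yf r)) : Int)
          else 0)).sum)).sum := by
  unfold r2rightTriangle
  dsimp only
  set L := (PySem.List.sorted (PySem.Set.ofList strArr) (fun x => x) false).map pySplit with hL
  set pts := (PySem.Set.ofList strArr).map pySplit with hpts
  have hperm : L.Perm pts := (PySem.List.sorted_perm (PySem.Set.ofList strArr) (fun x => x) false).map pySplit
  rw [PySem.List.foldl_pyRange_zero_pyGetD' L []
      (fun counter pi =>
        (PySem.List.pyRange 0 (L.length : Int) 1).foldl (fun counter j =>
          if pi = PySem.List.pyGetD L j [] then counter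
          else if xf pi = xf (PySem.List.pyGetD L j []) then
            (PySem.List.pyRange 0 (L.length : Int) 1).foldl (fun counter k =>
              if pi = PySem.List.pyGetD L k []
                  ∨ PySem.List.pyGetD L k [] = PySem.List.pyGetD L j [] then counter
              else if yf pi = yf (PySem.List.pyGetD L k []) then counter + 1
              else counter) counter
          else counter) counter) 0]
  rw [PySem.List.foldl_congr_mem L _
      (fun counter pi => counter + (L.map (fun pj =>
          if pi = pj then 0
          else if xf pi = xf pj then
            (L.countP (fun r => !(decide (pi = r) || decide (r = pj)) && decide (yf pi = yf r)) : Int)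
          else 0)).sum) 0
      (by intro acc x hx; exact pv_A_mid L x acc)]
  rw [PySem.List.foldl_add]
  -- now replace L by pts everywhere (permutation invariance)
  have hcnt : ∀ pi pj, L.countP (fun r => !(decide (pi = r) || decide (r = pj)) && decide (yf pi = yf r))
      = pts.countP (fun r => !(decide (pi = r) || decide (r = pj)) && decide (yf pi = yf r)) :=
    fun pi pj => hperm.countP_eq _
  have hin : ∀ pi, (L.map (fun pj =>
        if pi = pj then 0
        else if xf pi = xf pj then
          (L.countP (fun r => !(decide (pi = r) || decide (r = pj)) && decide (yf pi = yf r)) : Int)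
        else 0)).sum
      = (pts.map (fun pj =>
        if pi = pj then 0
        else if xf pi = xf pj then
          (pts.countP (fun r => !(decide (pi = r) || decide (r = pj)) && decide (yf pi = yf r)) : Int)
        else 0)).sum := by
    intro pi
    simp only [hcnt]
    exact (hperm.map _).sum_eq
  simp only [hin]
  rw [(hperm.map _).sum_eq]
  simp

theorem pv_B_eq_sum (strArr : List String) :
    r2rightTriangle_alt strArr =
      (((PySem.Set.ofList strArr).map pySplit).map (fun p =>
        if 1 < p.length ∧
            1 < (((PySem.Set.ofList strArr).map pySplit).countP (fun q => decide (xf q = xf p)) : Int) then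
          ((((PySem.Set.ofList strArr).map pySplit).countP (fun q => decide (xf q = xf p)) : Int) - 1)
            * ((((PySem.Set.ofList strArr).map pySplit).countP
                  (fun q => decide (1 < q.length) && decide (yf q = yf p)) : Int) - 1)
          - ((((PySem.Set.ofList strArr).map pySplit).countP
                  (fun q => decide (xf q = xf p) && decide (yf q = yf p) && decide (1 < q.length)) : Int) - 1)
        else 0)).sum := by
  unfold r2rightTriangle_alt
  dsimp only
  set pts := (PySem.Set.ofList strArr).map pySplit with hpts
  -- split the triple-accumulator fold into three folds
  rw [PySem.List.foldl_congr_mem pts _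
      (fun s p => (s.1.insert (xf p) (s.1.getD (xf p) 0 + 1),
        (if 1 < p.length then s.2.1.insert (yf p) (s.2.1.getD (yf p) 0 + 1) else s.2.1,
         if 1 < p.length then s.2.2.insert (xf p, yf p) (s.2.2.getD (xf p, yf p) 0 + 1) else s.2.2)))
      _ (by intro acc x hx; by_cases h : 1 < x.length <;> simp [h])]
  rw [PySem.List.foldl_prod_mk
      (f := fun (d : PySem.Dict String Int) (p : List String) => d.insert (xf p) (d.getD (xf p) 0 + 1))
      (g := fun (t : PySem.Dict String Int × PySem.Dict (String × String) Int) (p : List String) =>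
        (if 1 < p.length then t.1.insert (yf p) (t.1.getD (yf p) 0 + 1) else t.1,
         if 1 < p.length then t.2.insert (xf p, yf p) (t.2.getD (xf p, yf p) 0 + 1) else t.2))]
  rw [PySem.List.foldl_prod_mk
      (f := fun (d : PySem.Dict String Int) (p : List String) =>
        if 1 < p.length then d.insert (yf p) (d.getD (yf p) 0 + 1) else d)
      (g := fun (d : PySem.Dict (String × String) Int) (p : List String) =>
        if 1 < p.length then d.insert (xf p, yf p) (d.getD (xf p, yf p) 0 + 1) else d)]
  dsimp only
  have hcx : List.foldl (fun (d : PySem.Dict String Int) (p : List String) =>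
      d.insert (xf p) (d.getD (xf p) 0 + 1)) PySem.Dict.empty pts
      = PySem.Dict.counter (pts.map xf) :=
    List.foldl_map.symm.trans (PySem.Dict.foldl_insert_getD_add_one_eq_counter _)
  have hcy : List.foldl (fun (d : PySem.Dict String Int) (p : List String) =>
      if 1 < p.length then d.insert (yf p) (d.getD (yf p) 0 + 1) else d) PySem.Dict.empty pts
      = PySem.Dict.counter ((pts.filter (fun (p : List String) => decide (1 < p.length))).map yf) :=
    (PySem.List.foldl_ite_eq_foldl_filter (fun (p : List String) => 1 < p.length) _ _ _).trans
      (List.foldl_map.symm.trans (PySem.Dict.foldl_insert_getD_add_one_eq_counter _))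
  have hcxy : List.foldl (fun (d : PySem.Dict (String × String) Int) (p : List String) =>
      if 1 < p.length then d.insert (xf p, yf p) (d.getD (xf p, yf p) 0 + 1) else d) PySem.Dict.empty pts
      = PySem.Dict.counter ((pts.filter (fun (p : List String) => decide (1 < p.length))).map (fun p => (xf p, yf p))) :=
    (PySem.List.foldl_ite_eq_foldl_filter (fun (p : List String) => 1 < p.length) _ _ _).trans
      (List.foldl_map.symm.trans (PySem.Dict.foldl_insert_getD_add_one_eq_counter _))
  rw [hcx, hcy, hcxy]
  simp only [PySem.Dict.getD_counter, List.count_eq_countP, List.countP_map, List.countP_filter]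
  have e1 : ∀ p : List String, List.countP ((fun x => x == xf p) ∘ xf) pts
      = List.countP (fun q => decide (xf q = xf p)) pts := fun p =>
    List.countP_congr (by intro x hx; simp only [Function.comp_apply, beq_iff_eq, Bool.and_eq_true, decide_eq_true_eq, Prod.mk.injEq]; try tauto)
  have e2 : ∀ p : List String, List.countP (fun a => ((fun x => x == yf p) ∘ yf) a && decide (1 < a.length)) pts
      = List.countP (fun q => decide (1 < q.length) && decide (yf q = yf p)) pts := fun p =>
    List.countP_congr (by intro x hx; simp only [Function.comp_apply, beq_iff_eq, Bool.and_eq_true, decide_eq_true_eq, Prod.mk.injEq]; try tauto)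
  have e3 : ∀ p : List String, List.countP
        (fun a => ((fun x => x == (xf p, yf p)) ∘ fun p => (xf p, yf p)) a && decide (1 < a.length)) pts
      = List.countP (fun q => decide (xf q = xf p) && decide (yf q = yf p) && decide (1 < q.length)) pts := fun p =>
    List.countP_congr (by intro x hx; simp only [Function.comp_apply, beq_iff_eq, Bool.and_eq_true, decide_eq_true_eq, Prod.mk.injEq]; try tauto)
  simp only [e1, e2, e3]
  rw [PySem.List.foldl_congr_mem pts _
      (fun total p => total +
        (if 1 < p.length ∧ 1 < (↑(List.countP (fun q => decide (xf q = xf p)) pts) : Int) then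
          ((↑(List.countP (fun q => decide (xf q = xf p)) pts) : Int) - 1) *
              ((↑(List.countP (fun q => decide (1 < q.length) && decide (yf q = yf p)) pts) : Int) - 1) -
            ((↑(List.countP (fun q => decide (xf q = xf p) && decide (yf q = yf p) && decide (1 < q.length)) pts) : Int) - 1)
        else 0)) 0
      (by intro acc x hx; exact pv_ite_add _ _ _)]
  rw [PySem.List.foldl_add]
  simp

-- ===== VERDICT (by name: the statement is the Claim_ definition above) =====
theorem r2rightTriangle_spec : Claim_equal_r2rightTriangle := by
  intro strArr _ hpre
  unfold Spec_r2rightTriangle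
  rw [pv_A_eq_sum, pv_B_eq_sum]
  apply congrArg List.sum
  apply List.map_congr_left
  intro p hp
  have hnd := pv_nodup_pts strArr
  show pvATerm ((PySem.Set.ofList strArr).map pySplit) p
      = pvBTerm ((PySem.Set.ofList strArr).map pySplit) p
  rcases hpre with h | h | h
  · exact pv_term_short _ hnd h p hp
  · exact pv_term_long _ hnd h p hp
  · exact pv_term_noshare _ hnd h p hp
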